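-- pv_equiv track=rewrite | github.com/apeeling287/challenges | challenges/1/main.py | capToFront
-- ===== SOURCE A (Python) =====
-- def capToFront(input):
--     """Write your function here, which will return a string with all the capital letters at the front.
--
--     Args:
--         input (str): The input string.
--
--     Returns:
--         str: The result.
--     """
--     my_list_upper = []
--     my_list_lower = []
--     for i in input:
--         if i.isupper() == True:
--             my_list_upper.append(i)
--         if i.isupper() != True:
--             my_list_lower.append(i)
--
--     my_new_list = my_list_upper + my_list_lower
--     return "" .join(my_new_list)
-- ===== SOURCE B (Python) =====
-- def capToFront(input):
--     """Return a string with all the capital letters at the front."""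
--     return "".join(sorted(input, key=lambda c: not c.isupper()))
-- ===== Notes on version B (the rewrite author's own statement) =====
-- stated objective: idiomatic
-- what changed: Replaces the explicit two-accumulator partition loop with a single stable sort keyed on non-uppercase-ness, whose stability puts uppercase letters first while preserving order within each group.
import Mathlib
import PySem

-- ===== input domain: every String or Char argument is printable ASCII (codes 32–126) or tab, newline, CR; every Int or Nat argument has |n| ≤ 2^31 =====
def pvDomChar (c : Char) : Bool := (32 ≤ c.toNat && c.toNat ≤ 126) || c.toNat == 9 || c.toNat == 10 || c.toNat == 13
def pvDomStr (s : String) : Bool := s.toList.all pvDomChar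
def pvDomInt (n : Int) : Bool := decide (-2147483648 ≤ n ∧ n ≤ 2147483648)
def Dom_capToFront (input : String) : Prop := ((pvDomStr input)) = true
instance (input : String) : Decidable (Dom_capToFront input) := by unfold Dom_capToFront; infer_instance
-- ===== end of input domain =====

-- B replaces A's two-accumulator partition loop with one stable sort keyed on "not uppercase" (idiomatic).

-- ===== PORT A =====
-- loop body: two independent ifs appending to the upper / lower accumulator
def capStep (acc : List Char × List Char) (i : Char) : List Char × List Char :=
  let acc := if PySem.Chars.isupper i == true then (acc.1 ++ [i], acc.2) else acc
  if PySem.Chars.isupper i != true then (acc.1, acc.2 ++ [i]) else acc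

def capToFront (input : String) : String :=
  let acc := input.toList.foldl capStep ([], [])
  String.mk (acc.1 ++ acc.2)

-- ===== PORT B =====
-- "".join(sorted(input, key=lambda c: not c.isupper()))
def capToFront_alt (input : String) : String :=
  String.mk (PySem.List.sorted input.toList (fun c => !PySem.Chars.isupper c) false)

-- ===== PRECONDITION & SPEC =====
def Spec_capToFront (input : String) (out : String) : Prop := out = capToFront_alt input
instance (input : String) (out : String) : Decidable (Spec_capToFront input out) := by unfold Spec_capToFront; infer_instance

-- ===== CLAIM (what is proved, stated in full; the proofs are below) =====
def Claim_equal_capToFront : Prop := ∀ (input : String), Dom_capToFront input → Spec_capToFront input (capToFront input)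

-- ===== LEMMAS AND PROOFS =====

-- A's fold produces (filter isupper, filter not-isupper), from any starting accumulators.
theorem capA_fold (xs : List Char) (F T : List Char) :
    xs.foldl capStep (F, T)
    = (F ++ xs.filter (fun c => PySem.Chars.isupper c),
       T ++ xs.filter (fun c => !PySem.Chars.isupper c)) := by
  induction xs generalizing F T with
  | nil => simp
  | cons x t ih =>
    rw [List.foldl_cons]
    by_cases hx : PySem.Chars.isupper x = true
    · have h1 : capStep (F, T) x = (F ++ [x], T) := by simp [capStep, hx]
      rw [h1, ih]
      simp [hx, List.filter_cons, List.append_assoc]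
    · simp only [Bool.not_eq_true] at hx
      have h1 : capStep (F, T) x = (F, T ++ [x]) := by simp [capStep, hx]
      rw [h1, ih]
      simp [hx, List.filter_cons, List.append_assoc]

-- inserting an element whose key is false lands right after the existing false block
theorem insertBy_false (key : Char → Bool) (x : Char) (hx : key x = false)
    (F T : List Char) (hF : ∀ a ∈ F, key a = false) (hT : ∀ a ∈ T, key a = true) :
    PySem.List.insertBy (fun a b => decide (key a < key b)) x (F ++ T) = F ++ x :: T := by
  induction F with
  | nil =>
    cases T with
    | nil => rfl
    | cons y t =>
      have hy := hT y (by simp)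
      simp [PySem.List.insertBy, hx, hy]
  | cons f fs ih =>
    have hf := hF f (by simp)
    simp only [List.cons_append, PySem.List.insertBy, hx, hf]
    simpa using ih (fun a ha => hF a (List.mem_cons_of_mem _ ha))

-- inserting an element whose key is true lands at the very end
theorem insertBy_true (key : Char → Bool) (x : Char) (hx : key x = true) (ys : List Char) :
    PySem.List.insertBy (fun a b => decide (key a < key b)) x ys = ys ++ [x] := by
  apply PySem.List.insertBy_of_forall_not_before
  intro y _
  simp [hx]

-- the insertion-sort fold over a partitioned accumulator keeps it partitioned, stably
theorem foldl_insertBy_partition (key : Char → Bool) (xs : List Char) (F T : List Char)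
    (hF : ∀ a ∈ F, key a = false) (hT : ∀ a ∈ T, key a = true) :
    xs.foldl (fun acc x => PySem.List.insertBy (fun a b => decide (key a < key b)) x acc) (F ++ T)
    = (F ++ xs.filter (fun c => !key c)) ++ (T ++ xs.filter key) := by
  induction xs generalizing F T with
  | nil => simp
  | cons x t ih =>
    rw [List.foldl_cons]
    by_cases hx : key x = true
    · have hT' : ∀ a ∈ T ++ [x], key a = true := by
        intro a ha
        rcases List.mem_append.1 ha with h | h
        · exact hT a h
        · simp only [List.mem_singleton] at h
          simpa [h] using hx
      rw [insertBy_true key x hx, List.append_assoc, ih F (T ++ [x]) hF hT']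
      simp [hx, List.filter_cons, List.append_assoc]
    · simp only [Bool.not_eq_true] at hx
      have hF' : ∀ a ∈ F ++ [x], key a = false := by
        intro a ha
        rcases List.mem_append.1 ha with h | h
        · exact hF a h
        · simp only [List.mem_singleton] at h
          simpa [h] using hx
      rw [insertBy_false key x hx F T hF hT,
        show F ++ x :: T = (F ++ [x]) ++ T by simp,
        ih (F ++ [x]) T hF' hT]
      simp [hx, List.filter_cons, List.append_assoc]

-- sorting by a Bool key is the stable partition: false-key elements first, in order
theorem sorted_bool_key (key : Char → Bool) (xs : List Char) :
    PySem.List.sorted xs key false = xs.filter (fun c => !key c) ++ xs.filter key := by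
  rw [PySem.List.sorted_eq_foldl_insertBy]
  simpa using foldl_insertBy_partition key xs [] [] (by simp) (by simp)

-- ===== VERDICT (by name: the statement is the Claim_ definition above) =====
theorem capToFront_spec : Claim_equal_capToFront := by
  intro input _
  show capToFront input = capToFront_alt input
  unfold capToFront capToFront_alt
  rw [sorted_bool_key, capA_fold]
  simp
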